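-- pv_equiv track=rewrite | github.com/Kasarlakavyasri/Pichus | arrange_pichus.py | Rcheck
-- ===== SOURCE A (Python) =====
-- def Rcheck(house_map,r,c):
--     if(0<=r<len(house_map) and (0<= c <len(house_map[0]))):
--         if house_map[r][c] in "X@":
--             return True
--         elif house_map[r][c]=="p":
--             return False
--         else:
--             return Rcheck(house_map,r,c+1)
--     return True
-- ===== SOURCE B (Python) =====
-- def Rcheck(house_map, r, c):
--     # slice-and-search instead of recursion: look at the rest of the scanned row
--     # segment and decide by the FIRST relevant character found there.
--     if 0 <= r < len(house_map) and 0 <= c < len(house_map[0]):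
--         for ch in house_map[r][c:len(house_map[0])]:
--             if ch in "X@p":
--                 return ch != "p"
--     return True
-- ===== Notes on version B (the rewrite author's own statement) =====
-- stated objective: simpler
-- what changed: Replaced the tail recursion that re-checks bounds and re-indexes the row at every column with a single slice house_map[r][c:width] searched once for the first character in 'X@p'.
-- crash fix: When r,c are in range but row r is shorter than row 0 and contains no 'X','@' or 'p' at or after column c, A raises IndexError mid-scan; B's slice just truncates and B returns True. — e.g. on Rcheck(["ab", ""], 1, 0): A raises IndexError, B returns true
import Mathlib
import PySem

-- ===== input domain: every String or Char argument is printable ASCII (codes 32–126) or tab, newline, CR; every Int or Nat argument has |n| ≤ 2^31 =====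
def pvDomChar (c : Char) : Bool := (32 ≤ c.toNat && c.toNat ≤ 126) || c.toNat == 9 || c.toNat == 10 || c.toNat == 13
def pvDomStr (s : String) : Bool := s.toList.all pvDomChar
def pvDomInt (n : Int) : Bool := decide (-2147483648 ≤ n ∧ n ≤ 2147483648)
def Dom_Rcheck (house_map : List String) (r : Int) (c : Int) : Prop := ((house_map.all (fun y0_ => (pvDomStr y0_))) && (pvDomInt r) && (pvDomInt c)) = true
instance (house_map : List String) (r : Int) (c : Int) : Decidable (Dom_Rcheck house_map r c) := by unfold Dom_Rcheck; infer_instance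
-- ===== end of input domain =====

-- B replaces A's per-column tail recursion by one slice of the row searched once
-- for the first character of "X@p" (objective: simpler). Return values only.

-- ===== PORT A =====
-- fuel-based transliteration of A's recursion: fuel strictly exceeds (width - c),
-- so the 0-fuel branch is never reached on any call the Python makes.
def RcheckGo (house_map : List String) (r : Int) (width : Int) : Int → Nat → Bool
  | _, 0 => true
  | c, fuel+1 =>
    if 0 ≤ r ∧ r < (house_map.length : Int) ∧ 0 ≤ c ∧ c < width then
      -- house_map[r][c]; default is unreachable on inputs where the Python returns
      let ch := PySem.List.pyGetD (PySem.List.pyGetD house_map r "").toList c ' '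
      if ch = 'X' ∨ ch = '@' then true          -- house_map[r][c] in "X@"
      else if ch = 'p' then false               -- house_map[r][c] == "p"
      else RcheckGo house_map r width (c+1) fuel
    else true

def Rcheck (house_map : List String) (r : Int) (c : Int) : Bool :=
  let width : Int := ((PySem.List.pyGetD house_map 0 "").toList.length : Int)
  RcheckGo house_map r width c ((width - c).toNat + 1)

-- ===== PORT B =====
def Rcheck_alt (house_map : List String) (r : Int) (c : Int) : Bool :=
  let width : Int := ((PySem.List.pyGetD house_map 0 "").toList.length : Int)
  if 0 ≤ r ∧ r < (house_map.length : Int) ∧ 0 ≤ c ∧ c < width then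
    -- for ch in house_map[r][c:width]: first ch in "X@p" decides
    match (PySem.List.slice (PySem.List.pyGetD house_map r "").toList (some c) (some width)).find?
            (fun ch => ch == 'X' || ch == '@' || ch == 'p') with
    | some ch => ch != 'p'
    | none => true
  else true

-- ===== PRECONDITION & SPEC =====
-- Pre_ excludes exactly the inputs where A raises IndexError: r,c in range, row r
-- shorter than row 0, and no 'X'/'@'/'p' in row r at or after column c.
def Pre_Rcheck (house_map : List String) (r : Int) (c : Int) : Prop :=
  (0 ≤ r ∧ r < (house_map.length : Int) ∧ 0 ≤ c ∧
      c < ((PySem.List.pyGetD house_map 0 "").toList.length : Int)) →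
    ((PySem.List.pyGetD house_map 0 "").toList.length ≤ (PySem.List.pyGetD house_map r "").toList.length
      ∨ ∃ ch ∈ (PySem.List.pyGetD house_map r "").toList.drop c.toNat, ch = 'X' ∨ ch = '@' ∨ ch = 'p')
instance (house_map : List String) (r : Int) (c : Int) : Decidable (Pre_Rcheck house_map r c) := by
  unfold Pre_Rcheck; infer_instance

def pvWitness_Rcheck : List String × Int × Int := (["..X", "p.."], 1, 0)

-- On inputs where A raises IndexError (in-range r,c, row r shorter than row 0 with no
-- 'X'/'@'/'p' at or after column c) B returns True.
def Raises_Rcheck (house_map : List String) (r : Int) (c : Int) : Prop :=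
  (0 ≤ r ∧ r < (house_map.length : Int) ∧ 0 ≤ c ∧
      c < ((PySem.List.pyGetD house_map 0 "").toList.length : Int)) ∧
  (PySem.List.pyGetD house_map r "").toList.length < (PySem.List.pyGetD house_map 0 "").toList.length ∧
  ∀ ch ∈ (PySem.List.pyGetD house_map r "").toList.drop c.toNat, ¬(ch = 'X' ∨ ch = '@' ∨ ch = 'p')
instance (house_map : List String) (r : Int) (c : Int) : Decidable (Raises_Rcheck house_map r c) := by
  unfold Raises_Rcheck; infer_instance
def pvRaiseWitness_Rcheck : List String × Int × Int := (["ab", ""], 1, 0)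
def pvRaiseWitnessOut_Rcheck : Bool := true

def Spec_Rcheck (house_map : List String) (r : Int) (c : Int) (out : Bool) : Prop := out = Rcheck_alt house_map r c
instance (house_map : List String) (r : Int) (c : Int) (out : Bool) : Decidable (Spec_Rcheck house_map r c out) := by unfold Spec_Rcheck; infer_instance

-- ===== CLAIM (what is proved, stated in full; the proofs are below) =====
def Claim_equal_Rcheck : Prop := ∀ (house_map : List String) (r : Int) (c : Int), Dom_Rcheck house_map r c → Pre_Rcheck house_map r c → Spec_Rcheck house_map r c (Rcheck house_map r c)
def Claim_raises_Rcheck : Prop := (∀ (house_map : List String) (r : Int) (c : Int), Dom_Rcheck house_map r c → Raises_Rcheck house_map r c → ¬ Pre_Rcheck house_map r c) ∧ (Dom_Rcheck (pvRaiseWitness_Rcheck.1) (pvRaiseWitness_Rcheck.2.1) (pvRaiseWitness_Rcheck.2.2) ∧ Raises_Rcheck (pvRaiseWitness_Rcheck.1) (pvRaiseWitness_Rcheck.2.1) (pvRaiseWitness_Rcheck.2.2) ∧ Rcheck_alt (pvRaiseWitness_Rcheck.1) (pvRaiseWitness_Rcheck.2.1) (pvRaiseWitness_Rcheck.2.2)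 = pvRaiseWitnessOut_Rcheck)

-- ===== LEMMAS AND PROOFS =====

-- The scan invariant: with r in range, enough fuel, and the Pre_ disjunction at the
-- current column, A's recursion equals B's first-match search over the slice.
lemma go_eq (hm : List String) (r width : Int) (row : List Char)
    (hrow : row = (PySem.List.pyGetD hm r "").toList)
    (hr : 0 ≤ r ∧ r < (hm.length : Int)) :
    ∀ (fuel : Nat) (c : Int), 0 ≤ c → (width - c).toNat < fuel →
      (width ≤ (row.length : Int) ∨ ∃ ch ∈ row.drop c.toNat, ch = 'X' ∨ ch = '@' ∨ ch = 'p') →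
      RcheckGo hm r width c fuel =
        (match ((row.drop c.toNat).take (width - c).toNat).find?
            (fun ch => ch == 'X' || ch == '@' || ch == 'p') with
         | some ch => ch != 'p'
         | none => true) := by
  intro fuel
  induction fuel with
  | zero => intro c _ hf _; omega
  | succ n ih =>
    intro c hc hf hpre
    by_cases hcw : c < width
    · -- current column is scanned
      have hlt : c.toNat < row.length := by
        rcases hpre with hw | ⟨ch, hmem, _⟩
        · omega
        · have := List.length_pos_of_mem (List.mem_of_mem_drop hmem)
          by_contra h
          rw [List.drop_eq_nil_of_le (by omega)] at hmem
          simp at hmem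
      have hdrop : row.drop c.toNat = row[c.toNat] :: row.drop (c.toNat + 1) :=
        List.drop_eq_getElem_cons hlt
      have hch : PySem.List.pyGetD (PySem.List.pyGetD hm r "").toList c ' ' = row[c.toNat] := by
        rw [← hrow]
        exact PySem.List.pyGetD_eq_getElem row ' ' hc (by omega)
      have htk : (width - c).toNat = ((width - (c+1)).toNat) + 1 := by omega
      rw [RcheckGo, if_pos ⟨hr.1, hr.2, hc, hcw⟩]
      simp only [hch, hdrop, htk, List.take_succ_cons, List.find?_cons]
      set ch := row[c.toNat] with hchdef
      by_cases hx : ch = 'X' ∨ ch = '@'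
      · have : (ch == 'X' || ch == '@' || ch == 'p') = true := by
          rcases hx with h | h <;> simp [h]
        rw [if_pos hx]
        simp only [this]
        rcases hx with h | h <;> simp [h]
      · rw [if_neg hx]
        by_cases hp : ch = 'p'
        · rw [if_pos hp]
          simp [hp]
        · rw [if_neg hp]
          have hb : (ch == 'X' || ch == '@' || ch == 'p') = false := by
            simp only [Bool.or_eq_false_iff, beq_eq_false_iff_ne]
            exact ⟨⟨fun h => hx (Or.inl h), fun h => hx (Or.inr h)⟩, hp⟩
          simp only [hb]
          have hc1 : ((c + 1)).toNat = c.toNat + 1 := by omega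
          have := ih (c + 1) (by omega) (by omega) (by
            rcases hpre with hw | ⟨ch', hmem, hst⟩
            · exact Or.inl hw
            · refine Or.inr ⟨ch', ?_, hst⟩
              rw [hdrop] at hmem
              rcases List.mem_cons.1 hmem with h | h
              · exact absurd hst (by rw [← h] at hx hp; tauto)
              · rwa [hc1])
          rw [this, hc1]
    · -- bounds fail: both sides are True
      rw [RcheckGo, if_neg (by tauto)]
      have : (width - c).toNat = 0 := by omega
      simp [this]

lemma main_eq (hm : List String) (r c : Int) (hpre : Pre_Rcheck hm r c) :
    Rcheck hm r c = Rcheck_alt hm r c := by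
  unfold Rcheck Rcheck_alt
  set row : List Char := (PySem.List.pyGetD hm r "").toList with hrow
  set width : Int := ((PySem.List.pyGetD hm 0 "").toList.length : Int) with hwidth
  by_cases hb : 0 ≤ r ∧ r < (hm.length : Int) ∧ 0 ≤ c ∧ c < width
  · rw [if_pos hb]
    have hpre' := hpre ⟨hb.1, hb.2.1, hb.2.2.1, hb.2.2.2⟩
    have hslice : PySem.List.slice row (some c) (some width) =
        (row.drop c.toNat).take ((width - c).toNat) := by
      rw [PySem.List.slice_toNat row hb.2.2.1 (by rw [hwidth]; positivity)]
      congr 1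
      omega
    rw [go_eq hm r width row hrow ⟨hb.1, hb.2.1⟩ ((width - c).toNat + 1) c hb.2.2.1 (by omega)
        (by rw [hrow, hwidth]; exact_mod_cast hpre'), hslice]
  · rw [if_neg hb, RcheckGo, if_neg hb]

-- ===== VERDICT (by name: the statement is the Claim_ definition above) =====
theorem Rcheck_spec : Claim_equal_Rcheck := by
  intro hm r c _ hpre
  unfold Spec_Rcheck
  exact main_eq hm r c hpre

@[simp]
theorem Rcheck_raises : Claim_raises_Rcheck := by
  unfold Claim_raises_Rcheck
  constructor
  · intro hm r c _ hra hpre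
    rcases hra with ⟨hin, hshort, hno⟩
    rcases hpre hin with hw | ⟨ch, hmem, hst⟩
    · omega
    · exact hno ch hmem hst
  · refine ⟨by decide, ?_, ?_⟩
    · unfold Raises_Rcheck pvRaiseWitness_Rcheck
      norm_num [PySem.List.pyGetD, PySem.List.pyGet?, PySem.List.pyIdx?]
      decide
    · unfold Rcheck_alt pvRaiseWitness_Rcheck pvRaiseWitnessOut_Rcheck
      norm_num [PySem.List.pyGetD, PySem.List.pyGet?, PySem.List.pyIdx?, PySem.List.slice]
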